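-- pv_equiv track=rewrite | github.com/xcube-dev/xcube | xcube/server/impl/framework/tornado.py | path_to_pattern
-- ===== SOURCE A (Python) =====
-- def path_to_pattern(path: str):
--     """
--     Convert a string *pattern* where any occurrences of ``{NAME}``
--     are replaced by an equivalent regex expression which will
--     assign matching character groups to NAME. Characters match until
--     one of the RFC 2396 reserved characters is found or the end of
--     the *pattern* is reached.
--
--     :param path: URL path
--     :return: equivalent regex pattern
--     :raise ValueError: if *pattern* is invalid
--     """
--     name_pattern = r'(?P<%s>[^\;\/\?\:\@\&\=\+\$\,]+)'
--     reg_expr = ''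
--     pos = 0
--     while True:
--         pos1 = path.find('{', pos)
--         if pos1 >= 0:
--             pos2 = path.find('}', pos1 + 1)
--             if pos2 > pos1:
--                 name = path[pos1 + 1:pos2]
--                 if not name.isidentifier():
--                     raise ValueError(
--                         '"{name}" in path must be a valid identifier,'
--                         ' but got "%s"' % name)
--                 reg_expr += path[pos:pos1] + (name_pattern % name)
--                 pos = pos2 + 1
--             else:
--                 raise ValueError('missing closing "}" in "%s"' % path)
--         else:
--             pos2 = path.find('}', pos)
--             if pos2 >= pos:
--                 raise ValueError('missing opening "{" in "%s"' % path)
--             reg_expr += path[pos:]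
--             break
--     return reg_expr
-- ===== SOURCE B (Python) =====
-- def path_to_pattern(path: str):
--     """
--     Convert a string *pattern* where any occurrences of ``{NAME}``
--     are replaced by an equivalent regex expression (see original).
--     Re-implementation: split the whole path on '{' once; the first piece
--     is literal text, and every following chunk must start with
--     'name}' -- validated with a single partition per chunk.  A stray
--     '}' is only an error in the trailing literal, checked once after
--     the loop.
--     """
--     name_pattern = r'(?P<%s>[^\;\/\?\:\@\&\=\+\$\,]+)'
--     head, *chunks = path.split('{')
--     out = [head]
--     tail = head
--     for chunk in chunks:
--         name, sep, tail = chunk.partition('}')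
--         if not sep:
--             raise ValueError('missing closing "}" in "%s"' % path)
--         if not name.isidentifier():
--             raise ValueError(
--                 '"{name}" in path must be a valid identifier,'
--                 ' but got "%s"' % name)
--         out.append(name_pattern % name)
--         out.append(tail)
--     if '}' in tail:
--         raise ValueError('missing opening "{" in "%s"' % path)
--     return ''.join(out)
-- ===== Notes on version B (the rewrite author's own statement) =====
-- stated objective: idiomatic
-- what changed: Replaces A's index-based while-True scan with str.find by a staged decomposition: split the whole path on '{' once, then one for-loop that validates each chunk with a single partition('}'), with stray-'}' detection moved out of the scan into one tail check after the loop.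
import Mathlib
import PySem

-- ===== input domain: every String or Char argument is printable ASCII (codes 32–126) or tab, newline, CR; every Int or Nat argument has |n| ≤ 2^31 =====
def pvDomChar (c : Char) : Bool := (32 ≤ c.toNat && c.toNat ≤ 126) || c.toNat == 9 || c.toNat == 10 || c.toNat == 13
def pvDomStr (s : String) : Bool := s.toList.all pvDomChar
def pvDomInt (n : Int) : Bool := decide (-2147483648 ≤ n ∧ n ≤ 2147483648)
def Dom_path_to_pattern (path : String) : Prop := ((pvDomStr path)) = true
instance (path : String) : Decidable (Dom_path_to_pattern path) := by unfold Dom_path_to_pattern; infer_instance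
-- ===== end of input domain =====

-- B replaces A's index-based find loop by one split on '{' followed by a for-loop that
-- validates each chunk with a single partition('}') and a tail check after the loop
-- (objective: idiomatic staged decomposition; same cost).
-- Both Pythons raise ValueError on malformed templates; those inputs are excluded by Pre_path_to_pattern.

-- shared constant of both Pythons: name_pattern % name
def pvNamePat (name : List Char) : List Char :=
  "(?P<".toList ++ name ++ ">[^\\;\\/\\?\\:\\@\\&\\=\\+\\$\\,]+)".toList

-- hand port of str.isidentifier — exact on the ASCII input domain (letters/digits/underscore)
def pvIsIdent (cs : List Char) : Bool :=
  match cs with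
  | [] => false
  | c :: rest => (PySem.Chars.isalpha c || c == '_') &&
      rest.all (fun d => PySem.Chars.isalnum d || d == '_')

-- termination fact cited by pvSplit1 (and reused by the proofs below)
theorem pvTakeWhileNeLtLength (c : Char) (cs : List Char) (h : c ∈ cs) :
    (cs.takeWhile (· != c)).length < cs.length := by
  induction cs with
  | nil => cases h
  | cons d t ih =>
    by_cases hd : d = c
    · subst hd
      rw [List.takeWhile_cons_of_neg (by simp)]
      simp
    · rw [List.takeWhile_cons_of_pos (by simp [hd])]
      have hm : c ∈ t := by cases h with | head => exact absurd rfl hd | tail _ h => exact h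
      simpa using Nat.succ_lt_succ (ih hm)

-- ===== PORT A =====
-- the 'while True' loop; fuel = len+1 only makes the recursion total (each step advances pos by ≥ 2);
-- the [] results are the three 'raise ValueError' exits, excluded by Pre_path_to_pattern
def pvALoop (s : List Char) (fuel : Nat) (pos : Nat) (reg : List Char) : List Char :=
  match fuel with
  | 0 => reg
  | fuel + 1 =>
    let pos1 := PySem.Chars.findFrom s ['{'] (pos : Int)
    if 0 ≤ pos1 then
      let pos2 := PySem.Chars.findFrom s ['}'] (pos1 + 1)
      if pos1 < pos2 then
        let name := PySem.Chars.slice s (some (pos1 + 1)) (some pos2)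
        if pvIsIdent name then
          pvALoop s fuel (pos2 + 1).toNat
            (reg ++ PySem.Chars.slice s (some (pos : Int)) (some pos1) ++ pvNamePat name)
        else []  -- raise ValueError (invalid identifier)
      else []    -- raise ValueError (missing closing "}")
    else
      let pos2 := PySem.Chars.findFrom s ['}'] (pos : Int)
      if (pos : Int) ≤ pos2 then []  -- raise ValueError (missing opening "{")
      else reg ++ s.drop pos         -- reg_expr += path[pos:]; break

def path_to_pattern (path : String) : String :=
  String.ofList (pvALoop path.toList (path.toList.length + 1) 0 [])

-- ===== PORT B =====
-- hand port of str.split with a one-character separator (exact): path.split('{')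
def pvSplit1 (cs : List Char) (c : Char) : List (List Char) :=
  if h : c ∈ cs then
    cs.takeWhile (· != c) :: pvSplit1 (cs.drop ((cs.takeWhile (· != c)).length + 1)) c
  else [cs]
termination_by cs.length
decreasing_by
  have h1 := pvTakeWhileNeLtLength c cs h
  simp only [List.length_drop]
  omega

-- hand port of str.partition with a one-character separator (exact): (before, sep-found?, after)
def pvPartition (cs : List Char) (c : Char) : List Char × Bool × List Char :=
  let pre := cs.takeWhile (· != c)
  if pre.length = cs.length then (pre, false, [])
  else (pre, true, cs.drop (pre.length + 1))

-- Source B's for-loop over the chunks: carries (out, tail); none = a 'raise ValueError'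
-- exit (missing closing / invalid identifier), excluded by Pre_path_to_pattern
def pvBGo (chunks : List (List Char)) (out : List (List Char)) (tail : List Char) :
    Option (List (List Char) × List Char) :=
  match chunks with
  | [] => some (out, tail)
  | chunk :: rest =>
    let p := pvPartition chunk '}'
    if p.2.1 = false then none            -- raise ValueError (missing closing "}")
    else if pvIsIdent p.1 then
      pvBGo rest (out ++ [pvNamePat p.1, p.2.2]) p.2.2
    else none                             -- raise ValueError (invalid identifier)

def path_to_pattern_alt (path : String) : String :=
  match pvSplit1 path.toList '{' with
  | [] => ""                              -- unreachable: split never returns []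
  | head :: chunks =>
    match pvBGo chunks [head] head with
    | none => ""                          -- ValueError, excluded by Pre_path_to_pattern
    | some (out, tail) =>
      if '}' ∈ tail then ""               -- raise ValueError (missing opening "{")
      else String.ofList (PySem.Chars.join [] out)  -- ''.join(out)

-- ===== PRECONDITION & SPEC =====
-- Pre_: the template grammar on which A returns (on anything else A raises ValueError):
-- literal text and '{name}' placeholders with identifier names; a stray '}' is accepted only
-- when another '{' still follows (exactly A's acceptance); checked by a one-pass character
-- automaton (st 0 = literal, 1 = first name char, 2 = inside name; pend = stray '}' seen
-- in the trailing literal)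
def pvAutoGo (st : Nat) (pend : Bool) : List Char → Bool
  | [] => st == 0 && !pend
  | c :: rest =>
    if st = 0 then
      if c = '{' then pvAutoGo 1 false rest
      else if c = '}' then pvAutoGo 0 true rest
      else pvAutoGo 0 pend rest
    else if st = 1 then
      if PySem.Chars.isalpha c || c == '_' then pvAutoGo 2 pend rest else false
    else
      if c = '}' then pvAutoGo 0 pend rest
      else if PySem.Chars.isalnum c || c == '_' then pvAutoGo 2 pend rest
      else false

def Pre_path_to_pattern (path : String) : Prop := pvAutoGo 0 false path.toList = true
instance (path : String) : Decidable (Pre_path_to_pattern path) := by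
  unfold Pre_path_to_pattern; infer_instance

def pvWitness_path_to_pattern : String := "/data/{var}/tile/{z}.png"

def Spec_path_to_pattern (path : String) (out : String) : Prop := out = path_to_pattern_alt path
instance (path : String) (out : String) : Decidable (Spec_path_to_pattern path out) := by
  unfold Spec_path_to_pattern; infer_instance

-- ===== CLAIM (what is proved, stated in full; the proofs are below) =====
def Claim_equal_path_to_pattern : Prop := ∀ (path : String), Dom_path_to_pattern path → Pre_path_to_pattern path → Spec_path_to_pattern path (path_to_pattern path)

-- ===== LEMMAS AND PROOFS =====

-- the grammar form of the precondition (proof-only; proved equal to pvAutoGo below)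
def pvValid (cs : List Char) : Bool :=
  if h : '{' ∈ cs then
    let lit := cs.takeWhile (· != '{')
    let after := cs.drop (lit.length + 1)
    let name := after.takeWhile (· != '}')
    ('}' ∈ after) && pvIsIdent name && pvValid (after.drop (name.length + 1))
  else !decide ('}' ∈ cs)
termination_by cs.length
decreasing_by
  have h1 := pvTakeWhileNeLtLength '{' cs h
  simp only [List.length_drop]
  omega

-- the common value both programs compute on valid templates (proof-only model)
def pvOut (cs : List Char) : List Char :=
  if h : '{' ∈ cs then
    let lit := cs.takeWhile (· != '{')
    let after := cs.drop (lit.length + 1)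
    let name := after.takeWhile (· != '}')
    lit ++ pvNamePat name ++ pvOut (after.drop (name.length + 1))
  else cs
termination_by cs.length
decreasing_by
  have h1 := pvTakeWhileNeLtLength '{' cs h
  simp only [List.length_drop]
  omega

-- pvOut with the leading literal stripped (matches B's per-chunk appends)
def pvOutT (cs : List Char) : List Char :=
  if h : '{' ∈ cs then
    let lit := cs.takeWhile (· != '{')
    let after := cs.drop (lit.length + 1)
    let name := after.takeWhile (· != '}')
    pvNamePat name ++ (after.drop (name.length + 1)).takeWhile (· != '{') ++
      pvOutT (after.drop (name.length + 1))
  else []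
termination_by cs.length
decreasing_by
  have h1 := pvTakeWhileNeLtLength '{' cs h
  simp only [List.length_drop]
  omega

theorem pvTakeWhileLenEq (c : Char) (cs : List Char) (h : c ∉ cs) :
    cs.takeWhile (· != c) = cs := by
  induction cs with
  | nil => rfl
  | cons d t ih =>
    have hd : d ≠ c := fun e => h (e ▸ List.mem_cons_self)
    rw [List.takeWhile_cons_of_pos (by simp [hd])]
    rw [ih (fun m => h (List.mem_cons_of_mem d m))]

theorem pvDropWhileEqDrop (c : Char) (cs : List Char) :
    cs.dropWhile (· != c) = cs.drop (cs.takeWhile (· != c)).length := by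
  induction cs with
  | nil => rfl
  | cons d t ih =>
    by_cases hd : d = c
    · rw [List.dropWhile_cons_of_neg (by simp [hd]), List.takeWhile_cons_of_neg (by simp [hd])]
      rfl
    · rw [List.dropWhile_cons_of_pos (by simp [hd]), List.takeWhile_cons_of_pos (by simp [hd])]
      simpa using ih

theorem pvTakeTakeWhile (c : Char) (cs : List Char) :
    cs.take (cs.takeWhile (· != c)).length = cs.takeWhile (· != c) := by
  exact (List.prefix_iff_eq_take.mp (List.takeWhile_prefix _)).symm

-- [c] <+: u iff u starts with c
theorem pvSingletonPrefix (c : Char) (u : List Char) : [c] <+: u ↔ u[0]? = some c := by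
  cases u with
  | nil => simp
  | cons d v =>
    rw [List.cons_prefix_cons]
    simp [eq_comm]

theorem pvFindSingleton (c : Char) (t : List Char) :
    PySem.Chars.find t [c] =
      if c ∈ t then ((t.takeWhile (· != c)).length : Int) else -1 := by
  by_cases hc : c ∈ t
  · rw [if_pos hc]
    have hinf : [c] <:+: t := (List.singleton_infix_iff c t).mpr hc
    have h0 : 0 ≤ PySem.Chars.find t [c] := (PySem.Chars.find_nonneg_iff t [c]).mpr hinf
    obtain ⟨hpre, hmin⟩ := PySem.Chars.find_spec h0
    set k := (t.takeWhile (· != c)).length with hk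
    have hklt : k < t.length := pvTakeWhileNeLtLength c t hc
    have hgetk : t[k]? = some c := by
      have hdw : t.drop k = t.dropWhile (· != c) := (pvDropWhileEqDrop c t).symm
      have hne : t.dropWhile (· != c) ≠ [] := by
        intro hnil
        have h' := List.takeWhile_append_dropWhile (p := (· != c)) (l := t)
        rw [hnil, List.append_nil] at h'
        have : k = t.length := by rw [hk, h']
        omega
      obtain ⟨d, v, hdv⟩ := List.exists_cons_of_ne_nil hne
      have hpd := List.head?_dropWhile_not (· != c) t
      rw [hdv] at hpd
      simp only [List.head?_cons] at hpd
      have hdc : d = c := by simpa using hpd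
      rw [← List.head?_drop, hdw, hdv, hdc, List.head?_cons]
    have hlt : ∀ i, i < k → t[i]? ≠ some c := by
      intro i hi hcontra
      have htake : t.take k = t.takeWhile (· != c) := pvTakeTakeWhile c t
      have : (t.take k)[i]? = some c := by rw [List.getElem?_take_of_lt hi]; exact hcontra
      rw [htake] at this
      have hmem : c ∈ t.takeWhile (· != c) := List.mem_of_getElem? this
      have := List.mem_takeWhile_imp hmem
      simp at this
    have h1 : ¬ k < (PySem.Chars.find t [c]).toNat := by
      intro hlt'
      refine (hmin k hlt') ((pvSingletonPrefix c (t.drop k)).mpr ?_)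
      rw [← List.head?_eq_getElem?, List.head?_drop]
      exact hgetk
    have h2 : ¬ (PySem.Chars.find t [c]).toNat < k := by
      intro hlt'
      have h3 := (pvSingletonPrefix c (t.drop (PySem.Chars.find t [c]).toNat)).mp hpre
      rw [← List.head?_eq_getElem?, List.head?_drop] at h3
      exact hlt _ hlt' h3
    omega
  · rw [if_neg hc]
    exact (PySem.Chars.find_eq_neg_one_iff t [c]).mpr
      (fun hinf => hc ((List.singleton_infix_iff c t).mp hinf))

theorem pvJoinNilFlatten (ps : List (List Char)) :
    PySem.Chars.join [] ps = ps.flatten := by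
  induction ps with
  | nil => simp [PySem.Chars.join_nil]
  | cons p ps ih =>
    cases ps with
    | nil => simp [PySem.Chars.join_singleton]
    | cons q r =>
      rw [PySem.Chars.join_cons_cons]
      simp only [List.flatten_cons] at *
      simp [ih]

theorem pvALoopValid (fuel : Nat) :
    ∀ (s : List Char) (pos : Nat) (reg : List Char), pos ≤ s.length →
    s.length - pos < fuel → pvValid (s.drop pos) = true →
    pvALoop s fuel pos reg = reg ++ pvOut (s.drop pos) := by
  induction fuel with
  | zero => intro s pos reg h1 h2 _; omega
  | succ f ih =>
    intro s pos reg hpos hfuel hval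
    by_cases hbr : '{' ∈ s.drop pos
    · rw [pvValid, dif_pos hbr] at hval
      simp only [Bool.and_eq_true, decide_eq_true_eq] at hval
      obtain ⟨⟨hmem, hid⟩, hrec⟩ := hval
      have hk : ((s.drop pos).takeWhile (· != '{')).length < (s.drop pos).length :=
        pvTakeWhileNeLtLength '{' _ hbr
      have hlend : (s.drop pos).length = s.length - pos := by simp
      generalize hkdef : ((s.drop pos).takeWhile (· != '{')).length = k at *
      have hppk : pos + k + 1 ≤ s.length := by omega
      have hdrop2 : s.drop (pos + k + 1) = (s.drop pos).drop (k + 1) := by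
        have h' : pos + (k + 1) = pos + k + 1 := by omega
        rw [List.drop_drop, h']
      have hk2 : (((s.drop pos).drop (k + 1)).takeWhile (· != '}')).length <
          ((s.drop pos).drop (k + 1)).length := pvTakeWhileNeLtLength '}' _ hmem
      have hlend2 : ((s.drop pos).drop (k + 1)).length = s.length - pos - (k + 1) := by
        simp; omega
      generalize hk2def : (((s.drop pos).drop (k + 1)).takeWhile (· != '}')).length = k2 at *
      have e1 : PySem.Chars.findFrom s ['{'] (pos : Int) = ((pos + k : Nat) : Int) := by
        rw [PySem.Chars.findFrom_natCast s ['{'] pos hpos, pvFindSingleton, if_pos hbr,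
          hkdef, if_neg (by omega)]
        push_cast; ring
      have e2 : PySem.Chars.findFrom s ['}'] (((pos + k : Nat) : Int) + 1) =
          ((pos + k + 1 + k2 : Nat) : Int) := by
        have hc : (((pos + k : Nat) : Int) + 1) = ((pos + k + 1 : Nat) : Int) := by
          push_cast; ring
        rw [hc, PySem.Chars.findFrom_natCast s ['}'] (pos + k + 1) hppk, hdrop2,
          pvFindSingleton, if_pos hmem, hk2def, if_neg (by omega)]
        push_cast; ring
      have elit : PySem.Chars.slice s (some ((pos : Nat) : Int)) (some ((pos + k : Nat) : Int)) =
          (s.drop pos).takeWhile (· != '{') := by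
        simp only [PySem.Chars.slice_eq_listSlice, PySem.List.slice_natCast]
        have h1 : pos + k - pos = k := by omega
        rw [h1, ← hkdef, pvTakeTakeWhile]
      have ename : PySem.Chars.slice s (some (((pos + k : Nat) : Int) + 1))
          (some ((pos + k + 1 + k2 : Nat) : Int)) =
          ((s.drop pos).drop (k + 1)).takeWhile (· != '}') := by
        have hc : (((pos + k : Nat) : Int) + 1) = ((pos + k + 1 : Nat) : Int) := by
          push_cast; ring
        rw [hc]
        simp only [PySem.Chars.slice_eq_listSlice, PySem.List.slice_natCast]
        have h1 : pos + k + 1 + k2 - (pos + k + 1) = k2 := by omega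
        rw [h1, hdrop2, ← hk2def, pvTakeTakeWhile]
      have etoNat : ((((pos + k + 1 + k2 : Nat) : Int)) + 1).toNat = pos + k + 1 + k2 + 1 := by
        omega
      have hdrop3 : s.drop (pos + k + 1 + k2 + 1) =
          ((s.drop pos).drop (k + 1)).drop (k2 + 1) := by
        rw [List.drop_drop, List.drop_drop]
        congr 1
        omega
      simp only [pvALoop, e1, e2, elit, ename]
      rw [if_pos (by positivity), if_pos (by omega), if_pos hid, etoNat]
      rw [ih s (pos + k + 1 + k2 + 1) _ (by omega) (by omega) (by rw [hdrop3]; exact hrec)]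
      conv_rhs => rw [pvOut, dif_pos hbr]
      simp only [hkdef, hk2def, hdrop3, List.append_assoc]
    · rw [pvValid, dif_neg hbr] at hval
      simp only [Bool.not_eq_true', decide_eq_false_iff_not] at hval
      have e1 : PySem.Chars.findFrom s ['{'] (pos : Int) = -1 := by
        rw [PySem.Chars.findFrom_natCast s ['{'] pos hpos, pvFindSingleton, if_neg hbr]
        simp
      have e2 : PySem.Chars.findFrom s ['}'] (pos : Int) = -1 := by
        rw [PySem.Chars.findFrom_natCast s ['}'] pos hpos, pvFindSingleton, if_neg hval]
        simp
      simp only [pvALoop, e1, e2]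
      rw [if_neg (by omega), if_neg (by omega)]
      conv_rhs => rw [pvOut, dif_neg hbr]

-- cs splits at the first occurrence of c
theorem pvSplitAtMem (c : Char) (cs : List Char) (h : c ∈ cs) :
    cs = cs.takeWhile (· != c) ++ c :: cs.drop ((cs.takeWhile (· != c)).length + 1) := by
  have hk : (cs.takeWhile (· != c)).length < cs.length := pvTakeWhileNeLtLength c cs h
  have hdw : cs.dropWhile (· != c) = cs.drop (cs.takeWhile (· != c)).length :=
    pvDropWhileEqDrop c cs
  have hcons : cs.drop (cs.takeWhile (· != c)).length =
      c :: cs.drop ((cs.takeWhile (· != c)).length + 1) := by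
    rw [List.drop_eq_getElem_cons hk]
    congr 1
    have hne : cs.dropWhile (· != c) ≠ [] := by
      rw [hdw]
      intro hnil
      have := congrArg List.length hnil
      simp at this
      omega
    obtain ⟨d, v, hdv⟩ := List.exists_cons_of_ne_nil hne
    have hpd := List.head?_dropWhile_not (· != c) cs
    rw [hdv] at hpd
    simp only [List.head?_cons] at hpd
    have hdc : d = c := by simpa using hpd
    have hsome : cs[(cs.takeWhile (· != c)).length]? = some c := by
      rw [← List.head?_drop, ← hdw, hdv, hdc, List.head?_cons]
    rw [List.getElem?_eq_getElem hk] at hsome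
    exact Option.some.inj hsome
  conv_lhs => rw [← List.takeWhile_append_dropWhile (p := (· != c)) (l := cs)]
  rw [hdw, hcons]

-- automaton on a brace-free literal
theorem pvAutoLit (cs : List Char) (pend : Bool) (h : '{' ∉ cs) :
    pvAutoGo 0 pend cs = !(pend || decide ('}' ∈ cs)) := by
  induction cs generalizing pend with
  | nil => simp [pvAutoGo]
  | cons c t ih =>
    have hc : c ≠ '{' := fun e => h (e ▸ List.mem_cons_self)
    have ht : '{' ∉ t := fun m => h (List.mem_cons_of_mem c m)
    by_cases hcr : c = '}'
    · subst hcr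
      simp [pvAutoGo, hc, ih true ht]
    · simp [pvAutoGo, hc, hcr, ih pend ht, Ne.symm hcr]

-- automaton consumes the literal before the first '{'
theorem pvAutoPre (lit rest : List Char) (pend : Bool) (h : '{' ∉ lit) :
    pvAutoGo 0 pend (lit ++ '{' :: rest) = pvAutoGo 1 false rest := by
  induction lit generalizing pend with
  | nil => rw [List.nil_append, pvAutoGo]; simp
  | cons c t ih =>
    have hc : c ≠ '{' := fun e => h (e ▸ List.mem_cons_self)
    have ht : '{' ∉ t := fun m => h (List.mem_cons_of_mem c m)
    rw [List.cons_append]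
    by_cases hcr : c = '}'
    · simp [pvAutoGo, hc, hcr, ih true ht]
    · simp [pvAutoGo, hc, hcr, ih pend ht]

-- automaton inside a name, after the first character
theorem pvAutoName2 (rest : List Char) :
    pvAutoGo 2 false rest =
      (decide ('}' ∈ rest) &&
        (rest.takeWhile (· != '}')).all (fun d => PySem.Chars.isalnum d || d == '_') &&
        pvAutoGo 0 false (rest.drop ((rest.takeWhile (· != '}')).length + 1))) := by
  induction rest with
  | nil => simp [pvAutoGo]
  | cons c t ih =>
    by_cases hc : c = '}'
    · subst hc
      rw [pvAutoGo]
      simp only [if_neg (by omega : ¬ (2 : Nat) = 0), if_neg (by omega : ¬ (2 : Nat) = 1)]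
      rw [List.takeWhile_cons_of_neg (by simp)]
      simp
    · rw [pvAutoGo]
      simp only [if_neg (by omega : ¬ (2 : Nat) = 0), if_neg (by omega : ¬ (2 : Nat) = 1),
        if_neg hc]
      rw [List.takeWhile_cons_of_pos (by simp [hc])]
      by_cases hd : (PySem.Chars.isalnum c || c == '_') = true
      · rw [if_pos hd, ih]
        simp [Ne.symm hc, hd, Bool.and_assoc]
      · rw [if_neg hd]
        simp only [List.all_cons]
        rw [Bool.eq_false_iff.mpr hd]
        simp

-- automaton scanning a whole name from its first character
theorem pvAutoName1 (rest : List Char) :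
    pvAutoGo 1 false rest =
      (decide ('}' ∈ rest) && pvIsIdent (rest.takeWhile (· != '}')) &&
        pvAutoGo 0 false (rest.drop ((rest.takeWhile (· != '}')).length + 1))) := by
  cases rest with
  | nil => simp [pvAutoGo]
  | cons c t =>
    by_cases hc : c = '}'
    · subst hc
      rw [pvAutoGo]
      simp only [if_neg (by omega : ¬ (1 : Nat) = 0)]
      rw [List.takeWhile_cons_of_neg (by simp)]
      simp [pvIsIdent, (by decide : PySem.Chars.isalpha '}' = false)]
    · rw [pvAutoGo]
      simp only [if_neg (by omega : ¬ (1 : Nat) = 0)]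
      rw [List.takeWhile_cons_of_pos (by simp [hc])]
      by_cases hd : (PySem.Chars.isalpha c || c == '_') = true
      · rw [if_pos hd, pvAutoName2]
        simp only [pvIsIdent, List.drop_succ_cons]
        simp [Ne.symm hc, hd, Bool.and_assoc]
      · rw [if_neg hd]
        simp only [pvIsIdent]
        rw [Bool.eq_false_iff.mpr hd]
        simp

-- the automaton precondition is exactly the grammar predicate
theorem pvAutoEqValid (cs : List Char) : pvAutoGo 0 false cs = pvValid cs := by
  by_cases hbr : '{' ∈ cs
  · have hsplit := pvSplitAtMem '{' cs hbr
    have hlitfree : '{' ∉ cs.takeWhile (· != '{') := by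
      intro m
      have := List.mem_takeWhile_imp m
      simp at this
    conv_lhs => rw [hsplit]
    rw [pvAutoPre _ _ false hlitfree, pvAutoName1, pvValid, dif_pos hbr]
    have ih := pvAutoEqValid
      ((cs.drop ((cs.takeWhile (· != '{')).length + 1)).drop
        (((cs.drop ((cs.takeWhile (· != '{')).length + 1)).takeWhile (· != '}')).length + 1))
    rw [ih]
  · rw [pvAutoLit cs false hbr, pvValid, dif_neg hbr]
    simp
termination_by cs.length
decreasing_by
  have h1 := pvTakeWhileNeLtLength '{' cs hbr
  simp only [List.length_drop]
  omega

-- an identifier contains no brace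
theorem pvIsIdentNoBrace (u : List Char) (h : pvIsIdent u = true) (c : Char)
    (hc : (PySem.Chars.isalnum c || c == '_') = false) : c ∉ u := by
  cases u with
  | nil => simp
  | cons d rest =>
    simp only [pvIsIdent, Bool.and_eq_true] at h
    obtain ⟨hd, hrest⟩ := h
    intro hmem
    cases hmem with
    | head =>
      have halpha : PySem.Chars.isalnum c || c == '_' := by
        rcases Bool.or_eq_true_iff.mp hd with h' | h'
        · exact Bool.or_eq_true_iff.mpr (Or.inl (by simp [PySem.Chars.isalnum, h']))
        · exact Bool.or_eq_true_iff.mpr (Or.inr h')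
      rw [hc] at halpha
      exact Bool.false_ne_true halpha
    | tail _ hmem =>
      have := List.all_eq_true.mp hrest c hmem
      rw [hc] at this
      exact Bool.false_ne_true this

-- partition at an explicit first occurrence
theorem pvTakeWhileAppendCons (u v : List Char) (c : Char) (h : c ∉ u) :
    (u ++ c :: v).takeWhile (· != c) = u := by
  rw [List.takeWhile_append, pvTakeWhileLenEq c u h, if_pos rfl,
    List.takeWhile_cons_of_neg (by simp)]
  simp

theorem pvPartitionAppend (u v : List Char) (c : Char) (h : c ∉ u) :
    pvPartition (u ++ c :: v) c = (u, true, v) := by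
  have htw := pvTakeWhileAppendCons u v c h
  have hdrop : (u ++ c :: v).drop (u.length + 1) = v := by
    rw [List.drop_append (l₁ := u)]
    simp
  simp only [pvPartition, htw, hdrop]
  rw [if_neg (by simp)]

-- takeWhile of cs splits: head of pvSplit1
theorem pvSplit1Head (cs : List Char) (c : Char) :
    pvSplit1 cs c = cs.takeWhile (· != c) :: (pvSplit1 cs c).tail := by
  rw [pvSplit1]
  by_cases h : c ∈ cs
  · rw [dif_pos h]
    rfl
  · rw [dif_neg h, pvTakeWhileLenEq c cs h]
    rfl

-- B's loop on a valid template (invariant over the pvValid recursion)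
-- pvSplit1 of a chunk that starts with 'name}' (name brace-free)
theorem pvSplit1Cons (name v : List Char) (h : '{' ∉ name) :
    pvSplit1 (name ++ '}' :: v) '{' =
      (name ++ '}' :: v.takeWhile (· != '{')) :: (pvSplit1 v '{').tail := by
  by_cases hv : '{' ∈ v
  · have hmem : '{' ∈ name ++ '}' :: v := by simp [hv]
    rw [pvSplit1, dif_pos hmem]
    have htw : (name ++ '}' :: v).takeWhile (· != '{') =
        name ++ '}' :: v.takeWhile (· != '{') := by
      rw [List.takeWhile_append, pvTakeWhileLenEq '{' name h, if_pos rfl,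
        List.takeWhile_cons_of_pos (by simp)]
    rw [htw]
    congr 1
    · rw [List.drop_append (l₁ := name)]
      have h1 : name.length + ('}' :: v.takeWhile (· != '{')).length + 1 ≥ name.length := by
        simp; omega
      rw [List.drop_eq_nil_of_le (by simp; omega), List.nil_append]
      have h2 : (name ++ '}' :: v.takeWhile (· != '{')).length + 1 - name.length =
          (v.takeWhile (· != '{')).length + 2 := by simp; omega
      rw [h2]
      have h3 : (v.takeWhile (· != '{')).length + 2 =
          ((v.takeWhile (· != '{')).length + 1) + 1 := by omega
      rw [h3, List.drop_succ_cons]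
      conv_rhs => rw [pvSplit1]
      rw [dif_pos hv]
      rfl
  · have hmem : '{' ∉ name ++ '}' :: v := by
      simp only [List.mem_append, List.mem_cons]
      push_neg
      exact ⟨h, by simp, hv⟩
    rw [pvSplit1, dif_neg hmem, pvTakeWhileLenEq '{' v hv]
    rw [pvSplit1, dif_neg hv]
    rfl

-- B's loop on a valid template (invariant over the pvValid recursion)
theorem pvBGoValid (cs : List Char) (hv : pvValid cs = true) : ∀ acc,
    ∃ out tail, pvBGo ((pvSplit1 cs '{').tail) acc (cs.takeWhile (· != '{')) =
        some (out, tail) ∧ '}' ∉ tail ∧ out.flatten = acc.flatten ++ pvOutT cs := by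
  intro acc
  by_cases hbr : '{' ∈ cs
  · rw [pvValid, dif_pos hbr] at hv
    simp only [Bool.and_eq_true, decide_eq_true_eq] at hv
    obtain ⟨⟨hmem, hid⟩, hrec⟩ := hv
    have hnb1 : '{' ∉ (cs.drop ((cs.takeWhile (· != '{')).length + 1)).takeWhile (· != '}') :=
      pvIsIdentNoBrace _ hid '{' (by decide)
    have hnb2 : '}' ∉ (cs.drop ((cs.takeWhile (· != '{')).length + 1)).takeWhile (· != '}') :=
      pvIsIdentNoBrace _ hid '}' (by decide)
    have hafter := pvSplitAtMem '}' (cs.drop ((cs.takeWhile (· != '{')).length + 1)) hmem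
    -- the chunk list after the head: first chunk is 'name}lit', rest are after''s chunks
    have htail : (pvSplit1 cs '{').tail =
        ((cs.drop ((cs.takeWhile (· != '{')).length + 1)).takeWhile (· != '}') ++
          '}' :: (((cs.drop ((cs.takeWhile (· != '{')).length + 1)).drop
            (((cs.drop ((cs.takeWhile (· != '{')).length + 1)).takeWhile (· != '}')).length + 1)).takeWhile
              (· != '{'))) ::
        (pvSplit1 ((cs.drop ((cs.takeWhile (· != '{')).length + 1)).drop
          (((cs.drop ((cs.takeWhile (· != '{')).length + 1)).takeWhile (· != '}')).length + 1)) '{').tail := by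
      rw [pvSplit1, dif_pos hbr]
      simp only [List.tail_cons]
      conv_lhs => rw [hafter]
      exact pvSplit1Cons _ _ hnb1
    rw [htail]
    obtain ⟨out, tail, hgo, htl, hf⟩ := pvBGoValid
      ((cs.drop ((cs.takeWhile (· != '{')).length + 1)).drop
        (((cs.drop ((cs.takeWhile (· != '{')).length + 1)).takeWhile (· != '}')).length + 1)) hrec
      (acc ++ [pvNamePat ((cs.drop ((cs.takeWhile (· != '{')).length + 1)).takeWhile (· != '}')),
        ((cs.drop ((cs.takeWhile (· != '{')).length + 1)).drop
          (((cs.drop ((cs.takeWhile (· != '{')).length + 1)).takeWhile (· != '}')).length + 1)).takeWhile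
            (· != '{')])
    refine ⟨out, tail, ?_, htl, ?_⟩
    · rw [pvBGo]
      rw [pvPartitionAppend _ _ '}' hnb2]
      simp only [Bool.true_eq_false, if_false, hid, if_true]
      exact hgo
    · rw [hf]
      conv_rhs => rw [pvOutT, dif_pos hbr]
      simp [List.append_assoc]
  · rw [pvValid, dif_neg hbr] at hv
    simp only [Bool.not_eq_true', decide_eq_false_iff_not] at hv
    refine ⟨acc, cs, ?_, ?_, ?_⟩
    · rw [pvSplit1, dif_neg hbr]
      simp only [List.tail_cons]
      rw [pvTakeWhileLenEq '{' cs hbr, pvBGo]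
    · exact hv
    · rw [pvOutT, dif_neg hbr]
      simp
termination_by cs.length
decreasing_by
  have h1 := pvTakeWhileNeLtLength '{' cs hbr
  simp only [List.length_drop]
  omega

-- pvOut is the leading literal plus pvOutT
theorem pvOutEq (cs : List Char) : pvOut cs = cs.takeWhile (· != '{') ++ pvOutT cs := by
  by_cases h : '{' ∈ cs
  · rw [pvOut, dif_pos h, pvOutT, dif_pos h]
    simp only [List.append_assoc]
    rw [pvOutEq ((cs.drop ((cs.takeWhile (· != '{')).length + 1)).drop
      (((cs.drop ((cs.takeWhile (· != '{')).length + 1)).takeWhile (· != '}')).length + 1))]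
  · rw [pvOut, dif_neg h, pvOutT, dif_neg h, pvTakeWhileLenEq '{' cs h]
    simp
termination_by cs.length
decreasing_by
  have h1 := pvTakeWhileNeLtLength '{' cs h
  simp only [List.length_drop]
  omega

-- ===== VERDICT (by name: the statement is the Claim_ definition above) =====
theorem path_to_pattern_spec : Claim_equal_path_to_pattern := by
  intro path _hdom hpre
  unfold Spec_path_to_pattern path_to_pattern path_to_pattern_alt
  have hval : pvValid path.toList = true := by
    rw [← pvAutoEqValid]
    exact hpre
  have ha := pvALoopValid (path.toList.length + 1) path.toList 0 [] (by omega) (by omega)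
    (by simpa using hval)
  obtain ⟨out, tail, hb, htail, hf⟩ := pvBGoValid path.toList hval [path.toList.takeWhile (· != '{')]
  rw [pvSplit1Head path.toList '{']
  simp only
  rw [hb]
  simp only [if_neg htail]
  rw [ha]
  simp only [List.nil_append]
  rw [pvJoinNilFlatten, hf, pvOutEq]
  simp
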